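-- pv_equiv track=rewrite | github.com/parth-kabra/DSA | GFG/Print first letter of every word in the string.py | firstAlphabet
-- ===== SOURCE A (Python) =====
-- def firstAlphabet(s):
-- 	res=""
-- 	rs=True
-- 	for i in range(len(s)):
-- 	    if(s[i]==" "):
-- 	        rs=True
-- 	    elif (s[i]!=" " and rs==True):
-- 	        res+=s[i]
-- 	        rs=False
-- 	return res
-- ===== SOURCE B (Python) =====
-- def firstAlphabet(s):
--     words = s.split(' ')
--     return ''.join(w[0] for w in words if w)
-- ===== Notes on version B (the rewrite author's own statement) =====
-- stated objective: simpler
-- what changed: Replaces A's index loop with a word-ready flag by splitting the string on the literal space and joining the first character of each non-empty word.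
import Mathlib
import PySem

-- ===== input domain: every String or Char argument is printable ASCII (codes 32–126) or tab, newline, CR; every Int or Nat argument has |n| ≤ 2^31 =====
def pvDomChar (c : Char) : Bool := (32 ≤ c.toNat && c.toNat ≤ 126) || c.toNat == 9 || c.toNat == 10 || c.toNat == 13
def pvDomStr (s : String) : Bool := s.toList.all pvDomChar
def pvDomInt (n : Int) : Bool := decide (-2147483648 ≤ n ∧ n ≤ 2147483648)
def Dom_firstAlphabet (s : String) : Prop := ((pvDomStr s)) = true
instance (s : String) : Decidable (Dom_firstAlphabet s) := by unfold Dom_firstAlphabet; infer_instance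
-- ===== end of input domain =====

-- B replaces A's char-by-char word-start flag scan with split-on-space then first char of each non-empty word (simpler decomposition; same cost).


-- ===== PORT A =====
-- for i in range(len(s)): flag scan; state = (res, rs)
def firstAlphabet (s : String) : String :=
  let cs := s.toList
  let st :=
    (PySem.List.pyRange 0 (PySem.Str.len s) 1).foldl
      (fun (st : List Char × Bool) i =>
        let c := PySem.List.pyGetD cs i ' '   -- i is always in range here
        if c = ' ' then (st.1, true)
        else if c ≠ ' ' ∧ st.2 = true then (st.1 ++ [c], false)
        else st)
      ([], true)
  String.ofList st.1

-- ===== PORT B =====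
-- words = s.split(' '); ''.join(w[0] for w in words if w)
def firstAlphabet_alt (s : String) : String :=
  let words := PySem.Chars.splitOn s.toList [' ']
  String.ofList (words.filterMap List.head?)

-- ===== PRECONDITION & SPEC =====
def Spec_firstAlphabet (s : String) (out : String) : Prop := out = firstAlphabet_alt s
instance (s : String) (out : String) : Decidable (Spec_firstAlphabet s out) := by unfold Spec_firstAlphabet; infer_instance

-- ===== CLAIM (what is proved, stated in full; the proofs are below) =====
def Claim_equal_firstAlphabet : Prop := ∀ (s : String), Dom_firstAlphabet s → Spec_firstAlphabet s (firstAlphabet s)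

-- ===== LEMMAS AND PROOFS =====

-- the common spec: first letters of the words of cs, rs = "ready to start a word"
def pvFirsts : List Char → Bool → List Char
  | [], _ => []
  | c :: cs, rs =>
      if c = ' ' then pvFirsts cs true
      else if rs then c :: pvFirsts cs false else pvFirsts cs false

-- split-on-single-space, structural form (mirrors splitOn.go with cur the reversed current word)
def pvSplit : List Char → List Char → List (List Char)
  | [], cur => [cur.reverse]
  | c :: rest, cur =>
      if c = ' ' then cur.reverse :: pvSplit rest [] else pvSplit rest (c :: cur)

theorem pvGo_eq_pvSplit (fuel : Nat) (l cur : List Char) (acc : List (List Char))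
    (h : l.length < fuel) :
    PySem.Chars.splitOn.go [' '] fuel l cur acc = acc.reverse ++ pvSplit l cur := by
  induction fuel generalizing l cur acc with
  | zero => omega
  | succ n ih =>
    cases l with
    | nil => simp [PySem.Chars.splitOn.go, pvSplit]
    | cons c rest =>
      simp only [PySem.Chars.splitOn.go]
      by_cases hc : c = ' '
      · subst hc
        simp only [List.isPrefixOf, BEq.rfl, Bool.true_and,
          if_true, List.length_singleton, List.drop_succ_cons, List.drop_zero]
        rw [ih rest [] (cur.reverse :: acc) (by simpa using Nat.lt_of_succ_lt_succ h)]
        simp [pvSplit]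
      · have hpre : [' '].isPrefixOf (c :: rest) = false := by
          simp [List.isPrefixOf]
          exact fun he => hc he.symm
        simp only [hpre, Bool.false_eq_true, if_false]
        rw [ih rest (c :: cur) acc (by simpa using Nat.lt_of_succ_lt_succ h)]
        simp [pvSplit, hc]

theorem pvSplitOn_eq (cs : List Char) :
    PySem.Chars.splitOn cs [' '] = pvSplit cs [] := by
  have := pvGo_eq_pvSplit (cs.length + 1) cs [] [] (by omega)
  simpa [PySem.Chars.splitOn] using this

theorem pvFilterMap_pvSplit (cs cur : List Char) :
    (pvSplit cs cur).filterMap List.head? =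
      cur.getLast?.toList ++ pvFirsts cs cur.isEmpty := by
  induction cs generalizing cur with
  | nil =>
    cases h : cur.getLast? <;>
      simp [pvSplit, pvFirsts, List.head?_reverse, h]
  | cons c rest ih =>
    by_cases hc : c = ' '
    · subst hc
      simp only [pvSplit, if_true, pvFirsts, List.filterMap_cons]
      rw [ih []]
      cases h : cur.reverse.head? with
      | none => simp [List.head?_reverse] at h ⊢; simp [h]
      | some d =>
        have : cur.getLast? = some d := by rwa [← List.head?_reverse]
        simp [this]
    · simp only [pvSplit, hc, if_false, pvFirsts]
      rw [ih (c :: cur)]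
      cases cur with
      | nil => simp
      | cons d cur' =>
        have h1 : (c :: d :: cur').getLast? = (d :: cur').getLast? := by
          simp [List.getLast?_cons_cons]
        simp [h1, List.isEmpty]

theorem pvFoldA (cs : List Char) (res : List Char) (rs : Bool) :
    (cs.foldl
      (fun (st : List Char × Bool) c =>
        if c = ' ' then (st.1, true)
        else if c ≠ ' ' ∧ st.2 = true then (st.1 ++ [c], false)
        else st)
      (res, rs)).1 = res ++ pvFirsts cs rs := by
  induction cs generalizing res rs with
  | nil => simp [pvFirsts]
  | cons c rest ih =>
    by_cases hc : c = ' '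
    · subst hc; simp [pvFirsts, ih]
    · cases rs with
      | true => simp [List.foldl_cons, hc, pvFirsts, ih]
      | false => simp [List.foldl_cons, hc, pvFirsts, ih]

-- ===== VERDICT (by name: the statement is the Claim_ definition above) =====
theorem firstAlphabet_spec : Claim_equal_firstAlphabet := by
  intro s _
  show firstAlphabet s = firstAlphabet_alt s
  have hfold := PySem.List.foldl_pyRange_zero_pyGetD (xs := s.toList) (d := ' ')
    (f := fun (st : List Char × Bool) c =>
        if c = ' ' then (st.1, true)
        else if c ≠ ' ' ∧ st.2 = true then (st.1 ++ [c], false)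
        else st) (init := (([] : List Char), true))
  simp only [ne_eq, PySem.List.len_eq] at hfold
  simp only [firstAlphabet, firstAlphabet_alt, pvSplitOn_eq, pvFilterMap_pvSplit,
    PySem.Str.len_eq, hfold, pvFoldA]
  simp
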